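-- pv_equiv track=rewrite | github.com/coolman-success/CodeSignalPractice | Arcade/The Core/4 - Loop Tunnel/31 - Increase Number Roundness - 2.py | solution
-- ===== SOURCE A (Python) =====
-- def solution(n):
--
--     nonzero = False
--     for d in str(n)[::-1]:
--         if nonzero and d == '0':
--             return True
--         elif d != '0':
--             nonzero = True
--
--     return False
-- ===== SOURCE B (Python) =====
-- def solution(n):
--     m = abs(n)
--     if m == 0:
--         return False
--     while m % 10 == 0:
--         m //= 10
--     while m > 0:
--         if m % 10 == 0:
--             return True
--         m //= 10
--     return False
-- ===== Notes on version B (the rewrite author's own statement) =====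
-- stated objective: alternative
-- what changed: B never builds the string: it works on the integer itself, stripping trailing zeros with division loops and then checking the remaining digits for a zero via mod-10 arithmetic, instead of A's flag-carrying reverse scan over str(n).
import Mathlib
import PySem

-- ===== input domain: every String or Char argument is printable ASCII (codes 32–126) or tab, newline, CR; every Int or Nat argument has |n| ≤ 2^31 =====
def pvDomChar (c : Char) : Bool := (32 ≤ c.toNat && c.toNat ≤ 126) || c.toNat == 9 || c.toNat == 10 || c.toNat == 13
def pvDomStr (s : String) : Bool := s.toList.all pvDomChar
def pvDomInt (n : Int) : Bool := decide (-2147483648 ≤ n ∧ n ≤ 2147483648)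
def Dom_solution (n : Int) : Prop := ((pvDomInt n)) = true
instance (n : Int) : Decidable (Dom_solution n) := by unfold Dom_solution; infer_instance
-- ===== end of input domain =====

-- B works on the integer itself with mod-10 arithmetic (strip trailing zeros by division, then
-- scan the remaining digits for a zero) instead of A's flag-carrying reverse scan over str(n): alternative.

-- ===== PORT A =====
-- the for-loop with early return, as structural recursion over the reversed characters
def solLoopA : Bool → List Char → Bool
  | _, [] => false
  | nonzero, d :: rest =>
    if nonzero && d == '0' then true
    else if d != '0' then solLoopA true rest
    else solLoopA nonzero rest

def solution (n : Int) : Bool :=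
  match PySem.List.slice? (PySem.Int.toChars n) none none (-1) with
  | some cs => solLoopA false cs
  | none => false  -- unreachable: step = -1 ≠ 0

-- ===== PORT B =====
-- while m % 10 == 0: m //= 10   (only reached with 0 < m; the 0 < m guard is a totality guard)
def stripB (m : Int) : Int :=
  if _h : 0 < m ∧ PySem.Int.mod m 10 = 0 then stripB (PySem.Int.floordiv m 10) else m
termination_by m.toNat
decreasing_by
  have h1 : PySem.Int.floordiv m 10 = m / 10 :=
    PySem.Int.floordiv_eq_ediv_of_pos (by norm_num)
  rw [h1]; omega

-- while m > 0: if m % 10 == 0: return True; m //= 10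
def hasZeroB (m : Int) : Bool :=
  if _h : 0 < m then
    if PySem.Int.mod m 10 = 0 then true else hasZeroB (PySem.Int.floordiv m 10)
  else false
termination_by m.toNat
decreasing_by
  have h1 : PySem.Int.floordiv m 10 = m / 10 :=
    PySem.Int.floordiv_eq_ediv_of_pos (by norm_num)
  rw [h1]; omega

def solution_alt (n : Int) : Bool :=
  let m : Int := |n|
  if m = 0 then false
  else hasZeroB (stripB m)

-- ===== PRECONDITION & SPEC =====
def Spec_solution (n : Int) (out : Bool) : Prop := out = solution_alt n
instance (n : Int) (out : Bool) : Decidable (Spec_solution n out) := by unfold Spec_solution; infer_instance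

-- ===== CLAIM (what is proved, stated in full; the proofs are below) =====
def Claim_equal_solution : Prop := ∀ (n : Int), Dom_solution n → Spec_solution n (solution n)

-- ===== LEMMAS AND PROOFS =====

-- A's loop once the flag is set: any remaining '0' answers true
lemma solLoopA_true (cs : List Char) : solLoopA true cs = cs.contains '0' := by
  induction cs with
  | nil => simp [solLoopA]
  | cons d rest ih =>
    by_cases h : d = '0'
    · simp [solLoopA, h]
    · simp [solLoopA, h, ih, Ne.symm h]

-- A's loop from the start: skip the leading '0's (trailing zeros of the number), then look for '0'
lemma solLoopA_false (cs : List Char) :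
    solLoopA false cs = (cs.dropWhile (· == '0')).contains '0' := by
  induction cs with
  | nil => simp [solLoopA]
  | cons d rest ih =>
    by_cases h : d = '0'
    · simpa [solLoopA, h] using ih
    · simp [solLoopA, h, Ne.symm h, solLoopA_true]

-- bridge: core's toDigitsCore with enough fuel is the reversed digit-character list
lemma toDigitsCore_eq (f : Nat) : ∀ (n : Nat) (l : List Char), 0 < n → n < f →
    Nat.toDigitsCore 10 f n l = ((Nat.digits 10 n).map Nat.digitChar).reverse ++ l := by
  induction f with
  | zero => intro n l h1 h2; omega
  | succ f ih =>
    intro n l h1 h2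
    rw [Nat.toDigitsCore]
    by_cases h : n / 10 = 0
    · have hn : n < 10 := by omega
      simp [h, Nat.digits_def' (by norm_num : 1 < 10) h1, Nat.mod_eq_of_lt hn]
    · have hd : 0 < n / 10 := Nat.pos_of_ne_zero h
      have hlt : n / 10 < f := by
        have : n / 10 < n := Nat.div_lt_self h1 (by norm_num)
        omega
      simp only [h, if_false]
      rw [ih (n / 10) _ hd hlt, Nat.digits_def' (by norm_num : 1 < 10) h1]
      simp

lemma toDigits_eq (n : Nat) (h : 0 < n) :
    Nat.toDigits 10 n = ((Nat.digits 10 n).map Nat.digitChar).reverse := by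
  have := toDigitsCore_eq (n + 1) n [] h (by omega)
  simpa [Nat.toDigits] using this

lemma digitChar_eq_zero_iff (d : Nat) (hd : d < 10) : (Nat.digitChar d = '0') ↔ d = 0 := by
  interval_cases d <;> simp [Nat.digitChar]

-- '0'-membership of the digit-character list = 0-membership of the digit list
lemma contains_map_digitChar (l : List Nat) (hl : ∀ d ∈ l, d < 10) :
    ((l.map Nat.digitChar).contains '0') = (l.contains 0) := by
  induction l with
  | nil => simp
  | cons d rest ih =>
    have hd : d < 10 := hl d (by simp)
    have hrest : ∀ x ∈ rest, x < 10 := fun x hx => hl x (by simp [hx])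
    simp only [List.map_cons, List.contains_cons, ih hrest]
    by_cases h : d = 0
    · simp [h, Nat.digitChar]
    · have hch : Nat.digitChar d ≠ '0' := fun hc => h ((digitChar_eq_zero_iff d hd).1 hc)
      have e1 : ('0' == Nat.digitChar d) = false := by
        simp only [beq_eq_false_iff_ne, ne_eq]
        exact fun hc => hch hc.symm
      have e2 : ((0 : Nat) == d) = false := by
        simp only [beq_eq_false_iff_ne, ne_eq]
        exact fun hc => h hc.symm
      rw [e1, e2]

-- character-level dropWhile/contains over the digit list = numeric dropWhile/contains
lemma chars_digits (l : List Nat) (hl : ∀ d ∈ l, d < 10) :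
    ((l.map Nat.digitChar).dropWhile (· == '0')).contains '0'
      = ((l.dropWhile (· == 0)).contains 0) := by
  induction l with
  | nil => simp
  | cons d rest ih =>
    have hd : d < 10 := hl d (by simp)
    have hrest : ∀ x ∈ rest, x < 10 := fun x hx => hl x (by simp [hx])
    by_cases h : d = 0
    · simp only [h, List.map_cons, List.dropWhile_cons]
      simpa using ih hrest
    · have hch : Nat.digitChar d ≠ '0' := fun hc => h ((digitChar_eq_zero_iff d hd).1 hc)
      simp only [List.map_cons, List.dropWhile_cons]
      rw [if_neg (by simpa using hch), if_neg (by simpa using h)]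
      simpa using contains_map_digitChar (d :: rest) hl

-- B's two loops together = numeric dropWhile-then-contains on the digit list
lemma hasZeroB_nat (m : Nat) : hasZeroB (m : Int) = (Nat.digits 10 m).contains 0 := by
  induction m using Nat.strong_induction_on with
  | _ m ih =>
    rcases Nat.eq_zero_or_pos m with h0 | hpos
    · subst h0; rw [hasZeroB]; simp
    · have hfd : PySem.Int.floordiv (m : Int) 10 = ((m / 10 : Nat) : Int) := by
        exact_mod_cast PySem.Int.floordiv_natCast m 10
      have hmd : PySem.Int.mod (m : Int) 10 = ((m % 10 : Nat) : Int) := by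
        exact_mod_cast PySem.Int.mod_natCast m 10
      have hlt : m / 10 < m := Nat.div_lt_self hpos (by norm_num)
      rw [hasZeroB, dif_pos (show (0 : Int) < m by exact_mod_cast hpos)]
      simp only [hmd, hfd]
      rw [Nat.digits_def' (by norm_num : 1 < 10) hpos]
      by_cases h : m % 10 = 0
      · rw [if_pos (by exact_mod_cast h)]
        simp [h]
      · rw [if_neg (by exact_mod_cast h)]
        rw [ih _ hlt]
        simp [Ne.symm h]

lemma stripB_hasZero (m : Nat) (hm : 0 < m) :
    hasZeroB (stripB (m : Int)) = (((Nat.digits 10 m).dropWhile (· == 0)).contains 0) := by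
  induction m using Nat.strong_induction_on with
  | _ m ih =>
    have hfd : PySem.Int.floordiv (m : Int) 10 = ((m / 10 : Nat) : Int) := by
      exact_mod_cast PySem.Int.floordiv_natCast m 10
    have hmd : PySem.Int.mod (m : Int) 10 = ((m % 10 : Nat) : Int) := by
      exact_mod_cast PySem.Int.mod_natCast m 10
    rw [Nat.digits_def' (by norm_num : 1 < 10) hm]
    by_cases h : m % 10 = 0
    · have h10 : 10 ≤ m := by omega
      have hdpos : 0 < m / 10 := Nat.div_pos h10 (by norm_num)
      have hlt : m / 10 < m := Nat.div_lt_self hm (by norm_num)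
      rw [stripB]
      have hcond : (0 : Int) < m ∧ PySem.Int.mod (m : Int) 10 = 0 :=
        ⟨by exact_mod_cast hm, by rw [hmd]; exact_mod_cast h⟩
      rw [dif_pos hcond, hfd]
      rw [ih _ hlt hdpos]
      simp [h]
    · have hcond : ¬ ((0 : Int) < m ∧ PySem.Int.mod (m : Int) 10 = 0) := by
        rintro ⟨_, hc⟩
        rw [hmd] at hc
        exact h (by exact_mod_cast hc)
      rw [stripB, dif_neg hcond, hasZeroB_nat]
      rw [Nat.digits_def' (by norm_num : 1 < 10) hm]
      simp [h]

-- every decimal digit is below 10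
lemma digits_lt (m : Nat) : ∀ d ∈ Nat.digits 10 m, d < 10 :=
  fun _ hd => Nat.digits_lt_base (by norm_num) hd

-- A on the reversed digit-character list of a positive number
lemma solLoopA_digits (m : Nat) :
    solLoopA false ((Nat.digits 10 m).map Nat.digitChar)
      = (((Nat.digits 10 m).dropWhile (· == 0)).contains 0) := by
  rw [solLoopA_false, chars_digits _ (digits_lt m)]

-- the digit-character list of a positive number contains a non-'0' character
lemma dropWhile_digits_ne_nil (m : Nat) (hm : 0 < m) :
    ((Nat.digits 10 m).map Nat.digitChar).dropWhile (· == '0') ≠ [] := by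
  intro hnil
  have hall := List.dropWhile_eq_nil_iff.1 hnil
  have hlast : (Nat.digits 10 m).getLast (Nat.digits_ne_nil_iff_ne_zero.2 (by omega)) ≠ 0 :=
    Nat.getLast_digit_ne_zero 10 (by omega)
  set L := Nat.digits 10 m with hL
  have hmem : L.getLast (Nat.digits_ne_nil_iff_ne_zero.2 (by omega)) ∈ L :=
    List.getLast_mem _
  have hc : Nat.digitChar (L.getLast (Nat.digits_ne_nil_iff_ne_zero.2 (by omega))) ∈
      L.map Nat.digitChar := List.mem_map.2 ⟨_, hmem, rfl⟩
  have := hall _ hc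
  have hd10 : L.getLast (Nat.digits_ne_nil_iff_ne_zero.2 (by omega)) < 10 :=
    digits_lt m _ hmem
  exact hlast ((digitChar_eq_zero_iff _ hd10).1 (by simpa using this))

-- ===== VERDICT (by name: the statement is the Claim_ definition above) =====
theorem solution_spec : Claim_equal_solution := by
  intro n _
  unfold Spec_solution solution solution_alt
  rw [PySem.List.slice?_none_none_neg_one]
  rcases lt_trichotomy n 0 with hn | hn | hn
  · -- negative: str(n) = '-' :: digits, the '-' lands at the end of the reversed list
    have hm : 0 < n.natAbs := by omega
    have habs : |n| = (n.natAbs : Int) := by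
      rw [abs_of_neg hn]; omega
    have hne : |n| ≠ 0 := by rw [habs]; exact_mod_cast hm.ne'
    simp only [PySem.Int.toChars, if_pos hn]
    rw [toDigits_eq n.natAbs hm]
    simp only [List.reverse_cons, List.reverse_reverse]
    -- reversed list = digit chars ++ ['-']
    rw [solLoopA_false]
    rw [List.dropWhile_append]
    have hnn := dropWhile_digits_ne_nil n.natAbs hm
    simp only [List.isEmpty_iff, if_neg hnn]
    have : (((Nat.digits 10 n.natAbs).map Nat.digitChar).dropWhile (· == '0') ++
        ['-']).contains '0'
        = (((Nat.digits 10 n.natAbs).map Nat.digitChar).dropWhile (· == '0')).contains '0' := by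
      simp
    rw [this, chars_digits _ (digits_lt n.natAbs)]
    rw [habs] at hne ⊢
    rw [if_neg hne, stripB_hasZero n.natAbs hm]
  · subst hn
    simp [PySem.Int.toChars, Nat.toDigits, Nat.toDigitsCore, solLoopA]
  · have hm : 0 < n.toNat := by omega
    have habs : |n| = (n.toNat : Int) := by
      rw [abs_of_pos hn]; omega
    have hne : |n| ≠ 0 := by rw [habs]; exact_mod_cast hm.ne'
    simp only [PySem.Int.toChars, if_neg (by omega : ¬ n < 0)]
    rw [toDigits_eq n.toNat hm, List.reverse_reverse]
    rw [solLoopA_digits n.toNat]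
    rw [habs] at hne ⊢
    rw [if_neg hne, stripB_hasZero n.toNat hm]
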